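-- pv_equiv track=rewrite | github.com/MasLiang/AutoClock | crg/src/pll_fac_calc.py | partition_in_order
-- ===== SOURCE A (Python) =====
-- def partition_in_order(domains, n):
--     # group clock domains to n groups, n is the number of PLLs
--     m = len(domains)
--     results = []
--
--     def backtrack(index, groups):
--         if index == m:
--             if len(groups) == n:
--                 results.append([g[:] for g in groups])
--             return
--         num = domains[index]
--
--         for group in groups:
--             if len(group) < 2:
--                 group.append(num)
--                 backtrack(index + 1, groups)
--                 group.pop()
--
--         if len(groups) < n:
--             groups.append([num])
--             backtrack(index + 1, groups)
--             groups.pop()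
--
--     backtrack(0, [])
--
--     return results
-- ===== SOURCE B (Python) =====
-- def partition_in_order(domains, n):
--     # Iterative level-wise expansion: maintain all partial groupings after each
--     # element instead of depth-first backtracking with mutable state.
--     partials = [[]]
--     for num in domains:
--         nxt = []
--         for groups in partials:
--             pre = []
--             rest = list(groups)
--             while rest:
--                 g = rest[0]
--                 rest = rest[1:]
--                 if len(g) < 2:
--                     nxt.append(pre + [g + [num]] + rest)
--                 pre = pre + [g]
--             if len(groups) < n:
--                 nxt.append(groups + [[num]])
--         partials = nxt
--     return [p for p in partials if len(p) == n]
-- ===== Notes on version B (the rewrite author's own statement) =====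
-- stated objective: alternative
-- what changed: Replaced the depth-first recursive backtracking with mutable group state by an iterative level-wise fold that carries the list of all partial groupings after each element and filters for exactly n groups at the end.
import Mathlib
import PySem

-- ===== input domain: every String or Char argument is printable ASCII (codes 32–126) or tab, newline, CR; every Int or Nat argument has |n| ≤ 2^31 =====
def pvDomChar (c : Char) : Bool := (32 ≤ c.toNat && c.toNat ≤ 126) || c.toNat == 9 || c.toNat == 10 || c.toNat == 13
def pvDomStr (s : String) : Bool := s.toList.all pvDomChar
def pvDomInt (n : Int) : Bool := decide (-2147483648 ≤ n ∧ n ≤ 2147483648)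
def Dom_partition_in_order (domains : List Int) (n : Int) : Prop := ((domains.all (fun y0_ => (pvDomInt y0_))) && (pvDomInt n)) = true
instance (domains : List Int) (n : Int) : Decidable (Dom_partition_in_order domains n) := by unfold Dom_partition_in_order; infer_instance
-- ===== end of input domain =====

-- B replaces A's depth-first recursive backtracking (mutable groups) by an iterative
-- level-wise fold over the elements carrying all partial groupings; same cost, different decomposition.

-- ===== PORT A =====
-- A's backtrack(index, groups) recurses on the remaining suffix domains[index:];
-- the for-loop over groups (append num / recurse / pop) is the helper pvForGroups,
-- which walks the groups keeping the already-visited prefix.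
def pvForGroups (k : List (List Int) → List (List (List Int))) (num : Int) :
    List (List Int) → List (List Int) → List (List (List Int))
  | _, [] => []
  | pre, g :: gs =>
      (if g.length < 2 then k (pre ++ (g ++ [num]) :: gs) else []) ++
      pvForGroups k num (pre ++ [g]) gs

def pvBacktrack (n : Int) (groups : List (List Int)) : List Int → List (List (List Int))
  | [] => if (groups.length : Int) = n then [groups] else []
  | num :: rest =>
      pvForGroups (fun g => pvBacktrack n g rest) num [] groups ++
      (if (groups.length : Int) < n then pvBacktrack n (groups ++ [[num]]) rest else [])

def partition_in_order (domains : List Int) (n : Int) : List (List (List Int)) :=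
  pvBacktrack n [] domains

-- ===== PORT B =====
-- the inner while-loop of Source B over one partial grouping
def pvPlace (num : Int) : List (List Int) → List (List Int) → List (List (List Int))
  | _, [] => []
  | pre, g :: gs =>
      (if g.length < 2 then [pre ++ (g ++ [num]) :: gs] else []) ++ pvPlace num (pre ++ [g]) gs

def pvChildren (n : Int) (num : Int) (groups : List (List Int)) : List (List (List Int)) :=
  pvPlace num [] groups ++ (if (groups.length : Int) < n then [groups ++ [[num]]] else [])

def pvStep (n : Int) (partials : List (List (List Int))) (num : Int) : List (List (List Int)) :=
  partials.flatMap (fun groups => pvChildren n num groups)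

def partition_in_order_alt (domains : List Int) (n : Int) : List (List (List Int)) :=
  (domains.foldl (pvStep n) [[]]).filter (fun p => (p.length : Int) = n)

-- ===== PRECONDITION & SPEC =====
def Spec_partition_in_order (domains : List Int) (n : Int) (out : List (List (List Int))) : Prop := out = partition_in_order_alt domains n
instance (domains : List Int) (n : Int) (out : List (List (List Int))) : Decidable (Spec_partition_in_order domains n out) := by unfold Spec_partition_in_order; infer_instance

-- ===== CLAIM (what is proved, stated in full; the proofs are below) =====
def Claim_equal_partition_in_order : Prop := ∀ (domains : List Int) (n : Int), Dom_partition_in_order domains n → Spec_partition_in_order domains n (partition_in_order domains n)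

-- ===== LEMMAS AND PROOFS =====

theorem pvStep_append (n : Int) (ps qs : List (List (List Int))) (num : Int) :
    pvStep n (ps ++ qs) num = pvStep n ps num ++ pvStep n qs num := by
  simp [pvStep]

theorem foldl_pvStep_append (n : Int) (l : List Int) (ps qs : List (List (List Int))) :
    l.foldl (pvStep n) (ps ++ qs) = l.foldl (pvStep n) ps ++ l.foldl (pvStep n) qs := by
  induction l generalizing ps qs with
  | nil => simp
  | cons num rest ih => simp [List.foldl, pvStep_append, ih]

theorem foldl_pvStep_flatMap (n : Int) (l : List Int) (ps : List (List (List Int))) :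
    l.foldl (pvStep n) ps = ps.flatMap (fun g => l.foldl (pvStep n) [g]) := by
  induction ps with
  | nil =>
      induction l with
      | nil => simp
      | cons num rest ih => simp [List.foldl, pvStep, ih]
  | cons g gs ih =>
      have : g :: gs = [g] ++ gs := rfl
      rw [this, foldl_pvStep_append, ih]
      simp [List.flatMap_cons]

-- B's value from a single starting partial `groups` over the suffix `l`
theorem main_inv (n : Int) (l : List Int) :
    ∀ groups : List (List Int),
      pvBacktrack n groups l =
        (l.foldl (pvStep n) [groups]).filter (fun p => (p.length : Int) = n) := by
  induction l with
  | nil =>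
      intro groups
      by_cases h : (groups.length : Int) = n <;> simp [pvBacktrack, h]
  | cons num rest ih =>
      intro groups
      have hchild :
          (rest.foldl (pvStep n) (pvChildren n num groups)).filter (fun p => (p.length : Int) = n) =
            (pvChildren n num groups).flatMap (fun g => pvBacktrack n g rest) := by
        rw [foldl_pvStep_flatMap]
        rw [List.filter_flatMap]
        refine List.flatMap_congr (fun g _ => ?_)
        exact (ih g).symm
      have hfold : (num :: rest).foldl (pvStep n) [groups] =
          rest.foldl (pvStep n) (pvChildren n num groups) := by
        simp [List.foldl, pvStep]
      rw [hfold, hchild]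
      -- expand children: placements into existing groups, then the new-group branch
      have hplace : ∀ pre gs : List (List Int),
          pvForGroups (fun g => pvBacktrack n g rest) num pre gs =
            (pvPlace num pre gs).flatMap (fun g => pvBacktrack n g rest) := by
        intro pre gs
        induction gs generalizing pre with
        | nil => simp [pvForGroups, pvPlace]
        | cons g gs ihg =>
            by_cases h : g.length < 2 <;>
              simp [pvForGroups, pvPlace, h, ihg]
      rw [pvBacktrack]
      simp only [pvChildren, List.flatMap_append, hplace]
      congr 1
      by_cases h : (groups.length : Int) < n <;> simp [h]

-- ===== VERDICT (by name: the statement is the Claim_ definition above) =====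
theorem partition_in_order_spec : Claim_equal_partition_in_order := by
  intro domains n _
  unfold Spec_partition_in_order partition_in_order partition_in_order_alt
  exact main_inv n domains []
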